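-- pv_equiv track=rewrite | github.com/llazzaro/chem-fingerprints | chemfp/sdf_reader.py | _find_tag_data
-- ===== SOURCE A (Python) =====
-- def _find_tag_data(rec, tag_substr):
--     "Return the first data line for the given tag substring, or return None"
--     startpos = 0
--     while 1:
--         tag_start = rec.find(tag_substr, startpos)
--         if tag_start == -1:
--             return None
--
--         # rfind cannot return -1 because _sdf_check_pat verified there
--         # are at least 3 newlines. The +1 is safe because there's at
--         # least the "<" and ">" from the tag.
--         tag_line_start = rec.rfind("\n", None, tag_start) + 1
--         if rec[tag_line_start] != ">":
--             # This tag is not on a data tag line. It might be the value for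
--             # some of the text field.
--             startpos = tag_start + 1
--             continue
--
--         # This is an actual tag line. Find the start of the next line.
--         # The record must end with "\n$$$$\n" so find will never return -1
--         # and never return the last character position.
--         next_line_start = rec.find("\n", tag_start) + 1
--
--         # These might occur if there is no data content
--         if rec[next_line_start]==">" or rec[next_line_start:next_line_start+4]=="$$$$":
--             return ""
--
--         # Otherwise, get up to the end of the line
--         return rec[next_line_start:rec.find("\n", next_line_start)]
-- ===== SOURCE B (Python) =====
-- def _find_tag_data(rec, tag_substr):
--     "Return the first data line for the given tag substring, or return None"
--     lines = rec.split("\n")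
--     for i, line in enumerate(lines):
--         if line.startswith(">") and tag_substr in line:
--             if i + 1 == len(lines):
--                 # tag line is the unterminated final line: no data line follows
--                 return None
--             nxt = lines[i + 1]
--             if nxt.startswith(">") or nxt[:4] == "$$$$":
--                 return ""
--             return nxt
--     return None
-- ===== Notes on version B (the rewrite author's own statement) =====
-- stated objective: simpler
-- what changed: Replaces the positional find/rfind occurrence scan with one split of the record into lines and a single line-by-line traversal that inspects the first '>' line containing the tag and the line after it.
-- intended difference: On truncated records whose first matching '>' tag line is the final line, or is followed only by an unterminated final data line, A wraps around to position 0 (returning '' or a prefix of the record's first line) resp. drops the data line's last character, while B returns None resp. the full final line, the intended data for such truncated records. — e.g. on _find_tag_data(">T\nD", "T"): A returns some "", B returns some "D"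
-- outside the precondition, e.g. on _find_tag_data('>T\nX\n$$$$\n', 'T\nX'): A returns 'X', B returns None
import Mathlib
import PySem

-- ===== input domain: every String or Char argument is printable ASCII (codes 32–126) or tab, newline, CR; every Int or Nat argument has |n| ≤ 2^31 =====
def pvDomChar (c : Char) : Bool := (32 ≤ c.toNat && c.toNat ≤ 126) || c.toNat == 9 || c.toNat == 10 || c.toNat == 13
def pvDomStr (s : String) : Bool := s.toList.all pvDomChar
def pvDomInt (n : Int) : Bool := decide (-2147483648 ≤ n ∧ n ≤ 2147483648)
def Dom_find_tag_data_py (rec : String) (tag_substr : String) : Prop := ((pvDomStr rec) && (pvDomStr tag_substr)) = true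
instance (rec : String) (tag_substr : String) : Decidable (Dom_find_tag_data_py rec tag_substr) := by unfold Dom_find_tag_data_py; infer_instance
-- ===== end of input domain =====

-- B re-implements the positional find/rfind scan as one split into lines plus a single line scan
-- (simpler); equivalence is proved outside D_ (truncated records, where B returns the intended data).

-- ===== PORT A =====
-- literal transliteration of A's while-loop; fuel only makes the loop total (startpos strictly
-- increases and Python's find past the end returns -1, so fuel = len + 2 is never exhausted).
def findTagLoopA (cs t : List Char) : Nat → Nat → Option (List Char)
  | _, 0 => none
  | startpos, fuel+1 =>
    let tag_start := PySem.Chars.findFrom cs t (startpos : Int)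
    if tag_start = -1 then none
    else
      let tag_line_start := PySem.Chars.rfindFrom cs ['\n'] 0 (some tag_start) + 1
      if PySem.List.pyGetD cs tag_line_start ' ' ≠ '>' then
        findTagLoopA cs t (tag_start.toNat + 1) fuel
      else
        let next_line_start := PySem.Chars.findFrom cs ['\n'] tag_start + 1
        if PySem.List.pyGetD cs next_line_start ' ' = '>'
            ∨ PySem.List.slice cs (some next_line_start) (some (next_line_start + 4)) = ['$','$','$','$'] then
          some []
        else
          some (PySem.List.slice cs (some next_line_start) (some (PySem.Chars.findFrom cs ['\n'] next_line_start)))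

def find_tag_data_py (rec : String) (tag_substr : String) : Option String :=
  (findTagLoopA rec.toList tag_substr.toList 0 (rec.toList.length + 2)).map (fun l => String.ofList l)

-- ===== PORT B =====
-- literal transliteration of Source B: split once on '\n', then scan the enumerated lines; at the
-- first '>' line containing the tag inspect lines[i+1] (the index access is guarded by i+1 != len,
-- so the none branch of pyGet? is unreachable).
def scanLinesB (t : List Char) (lines : List (List Char)) : Nat → List (List Char) → Option (List Char)
  | _, [] => none
  | i, line :: rest =>
    if PySem.Chars.startswith line ['>'] && PySem.Chars.isIn t line then
      if i + 1 == lines.length then none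
      else
        match PySem.List.pyGet? lines ((i : Int) + 1) with
        | some nxt =>
          if PySem.Chars.startswith nxt ['>'] || PySem.List.slice nxt none (some 4) == ['$','$','$','$'] then
            some []
          else some nxt
        | none => none
    else scanLinesB t lines (i + 1) rest

def find_tag_data_py_alt (rec : String) (tag_substr : String) : Option String :=
  (scanLinesB tag_substr.toList (PySem.Chars.splitOn rec.toList ['\n']) 0
      (PySem.Chars.splitOn rec.toList ['\n'])).map (fun l => String.ofList l)

-- ===== PRECONDITION & SPEC =====
-- Pre_ excludes (a) tag substrings containing a newline that actually occur in rec (they can match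
-- across a line boundary, a corner no line-based reading reproduces), and (b) the inputs where
-- Python A raises IndexError (the first matching tag line — or, for an empty tag with no tag line,
-- the scan's final position — is followed only by the empty final chunk of a record ending in '\n').
def Pre_find_tag_data_py (rec : String) (tag_substr : String) : Prop :=
  (tag_substr.toList.contains '\n' && decide (tag_substr.toList <:+: rec.toList)) = false
  ∧ (let L := rec.toList.splitOn '\n'
     ((L.findIdx? fun l => l.head? == some '>' && decide (tag_substr.toList <:+: l)).elim
        (tag_substr.toList.isEmpty && L.getLast? == some [])
        (fun i => i + 2 == L.length && L.getLast? == some [])) = false)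
instance (rec : String) (tag_substr : String) : Decidable (Pre_find_tag_data_py rec tag_substr) := by
  unfold Pre_find_tag_data_py; infer_instance

def pvWitness_find_tag_data_py : String × String := (">foo<X>\nbar\n$$$$\n", "X")

-- On truncated records — the first matching '>' tag line is the final line, or is followed only by an
-- unterminated final data line — A wraps around to position 0 (returning "" or a prefix of the
-- record's first line) resp. drops the data line's last character, while B returns none resp. the
-- full final line, the intended data for such truncated records.
def D_find_tag_data_py (rec : String) (tag_substr : String) : Prop :=
  let L := (PySem.Str.split? rec "\n").getD []
  ((L.findIdx? fun l => PySem.Str.startswith l ">" && PySem.Str.isIn tag_substr l).any fun i =>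
    L[i+1]?.all fun l =>
      i + 2 == L.length && !(PySem.Str.startswith l ">" || PySem.Str.startswith l "$$$$")) = true
instance (rec : String) (tag_substr : String) : Decidable (D_find_tag_data_py rec tag_substr) := by
  unfold D_find_tag_data_py; infer_instance

def Spec_find_tag_data_py (rec : String) (tag_substr : String) (out : Option String) : Prop :=
  ¬ D_find_tag_data_py rec tag_substr → out = find_tag_data_py_alt rec tag_substr
instance (rec : String) (tag_substr : String) (out : Option String) : Decidable (Spec_find_tag_data_py rec tag_substr out) := by
  unfold Spec_find_tag_data_py; infer_instance

def pvDiffWitness_find_tag_data_py : String × String := (">T\nD", "T")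
def pvDiffWitnessOut_find_tag_data_py : (Option String) × (Option String) := (some "", some "D")

-- ===== CLAIM (what is proved, stated in full; the proofs are below) =====
def Claim_unchanged_find_tag_data_py : Prop := ∀ (rec : String) (tag_substr : String), Dom_find_tag_data_py rec tag_substr → Pre_find_tag_data_py rec tag_substr → Spec_find_tag_data_py rec tag_substr (find_tag_data_py rec tag_substr)
def Claim_changed_find_tag_data_py : Prop := Dom_find_tag_data_py (pvDiffWitness_find_tag_data_py.1) (pvDiffWitness_find_tag_data_py.2) ∧ Pre_find_tag_data_py (pvDiffWitness_find_tag_data_py.1) (pvDiffWitness_find_tag_data_py.2) ∧ D_find_tag_data_py (pvDiffWitness_find_tag_data_py.1) (pvDiffWitness_find_tag_data_py.2) ∧ find_tag_data_py (pvDiffWitness_find_tag_data_py.1) (pvDiffWitness_find_tag_data_py.2) = pvDiffWitnessOut_find_tag_data_py.1 ∧ find_tag_data_py_alt (pvDiffWitness_find_tag_data_py.1) (pvDiffWitness_find_tag_data_py.2) = pvDiffWitnessOut_find_tag_data_py.2 ∧ pvDiffWitnessOut_find_tag_data_py.1 ≠ pvDiffWitnessOut_find_tag_data_py.2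

def Claim_exact_find_tag_data_py : Prop := ∀ (rec : String) (tag_substr : String), Dom_find_tag_data_py rec tag_substr → Pre_find_tag_data_py rec tag_substr → D_find_tag_data_py rec tag_substr → find_tag_data_py rec tag_substr ≠ find_tag_data_py_alt rec tag_substr

-- ===== LEMMAS AND PROOFS =====

-- proof-side line predicate: l is a matching tag line
def pvTagLine (t line : List Char) : Bool := decide (['>'] <+: line ∧ t <:+: line)

-- the simple line-list scan pvScan; scanLinesB (the port of B) is proved equal to it below
def pvScan (t : List Char) : List (List Char) → Option (List Char)
  | [] => none
  | line :: rest =>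
    if PySem.Chars.startswith line ['>'] && PySem.Chars.isIn t line then
      match rest with
      | [] => none
      | nxt :: _ =>
        if PySem.Chars.startswith nxt ['>'] || PySem.List.slice nxt none (some 4) == ['$','$','$','$'] then
          some []
        else some nxt
    else pvScan t rest

-- D_ restated over the character-level line split
def pvDB (t : List Char) (L : List (List Char)) : Bool :=
  (L.findIdx? (pvTagLine t)).any fun i =>
    L[i+1]?.all fun l =>
      i + 2 == L.length && !(decide (['>'] <+: l) || l.take 4 == ['$','$','$','$'])

-- ---- generic list/PySem facts ----
theorem pv_single_prefix {c : Char} {w : List Char} : ([c] <+: w) ↔ w.head? = some c := by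
  cases w with
  | nil => simp
  | cons a as =>
    constructor
    · rintro ⟨t, ht⟩; simp at ht; simp [ht.1]
    · intro h; simp at h; exact ⟨as, by simp [h]⟩

theorem pv_single_isPrefixOf {c : Char} {w : List Char} : ([c].isPrefixOf w = true) ↔ w[0]? = some c := by
  rw [List.isPrefixOf_iff_prefix, pv_single_prefix, List.head?_eq_getElem?]

theorem pv_single_prefix_drop {c : Char} {s : List Char} {m : Nat} :
    ([c].isPrefixOf (s.drop m) = true) ↔ s[m]? = some c := by
  rw [List.isPrefixOf_iff_prefix, pv_single_prefix, List.head?_drop]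

-- ---------- rfind.go ----------
theorem pv_rgo_zero (s sub : List Char) : PySem.Chars.rfind.go s sub 0 = if sub.isPrefixOf s then 0 else -1 := by
  simp [PySem.Chars.rfind.go]

theorem pv_rgo_succ (s sub : List Char) (j : Nat) :
    PySem.Chars.rfind.go s sub (j+1) =
      if sub.isPrefixOf (s.drop (j+1)) then ((j+1 : Nat) : Int) else PySem.Chars.rfind.go s sub j := by
  rw [PySem.Chars.rfind.go]

theorem pv_rgo_neg (s : List Char) (c : Char) : ∀ (n : Nat), (∀ m ≤ n, s[m]? ≠ some c) →
    PySem.Chars.rfind.go s [c] n = -1 := by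
  intro n
  induction n with
  | zero =>
    intro h
    rw [pv_rgo_zero, if_neg]
    intro hp
    rw [pv_single_isPrefixOf] at hp
    exact h 0 le_rfl hp
  | succ j ih =>
    intro h
    rw [pv_rgo_succ, if_neg, ih (fun m hm => h m (by omega))]
    intro hp
    rw [pv_single_prefix_drop] at hp
    exact h (j+1) le_rfl hp

theorem pv_rgo_pos (s : List Char) (c : Char) : ∀ (n m : Nat), m ≤ n → s[m]? = some c →
    (∀ m', m < m' → m' ≤ n → s[m']? ≠ some c) →
    PySem.Chars.rfind.go s [c] n = m := by
  intro n
  induction n with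
  | zero =>
    intro m hm hc _
    have h0 : m = 0 := by omega
    subst h0
    rw [pv_rgo_zero, if_pos (pv_single_isPrefixOf.2 hc)]
    simp
  | succ j ih =>
    intro m hm hc hmax
    by_cases h : m = j + 1
    · subst h
      rw [pv_rgo_succ, if_pos (pv_single_prefix_drop.2 hc)]
    · rw [pv_rgo_succ, if_neg, ih m (by omega) hc (fun m' h1 h2 => hmax m' h1 (by omega))]
      intro hp
      rw [pv_single_prefix_drop] at hp
      exact hmax (j+1) (by omega) le_rfl hp

theorem pv_rgo_ne (s : List Char) (c : Char) : ∀ (n m : Nat), m ≤ n → s[m]? = some c →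
    PySem.Chars.rfind.go s [c] n ≠ -1 := by
  intro n
  induction n with
  | zero =>
    intro m hm hc
    have h0 : m = 0 := by omega
    subst h0
    rw [pv_rgo_zero, if_pos (pv_single_isPrefixOf.2 hc)]
    simp
  | succ j ih =>
    intro m hm hc
    rw [pv_rgo_succ]
    split
    · omega
    · next hp =>
      rcases Nat.lt_or_ge m (j+1) with h | h
      · exact ih m (by omega) hc
      · have : m = j + 1 := by omega
        subst this
        exact absurd (pv_single_prefix_drop.2 hc) hp

theorem pv_rgo_spec (s : List Char) (c : Char) : ∀ (n : Nat), PySem.Chars.rfind.go s [c] n ≠ -1 →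
    ∃ m ≤ n, PySem.Chars.rfind.go s [c] n = m ∧ s[m]? = some c ∧ ∀ m', m < m' → m' ≤ n → s[m']? ≠ some c := by
  intro n
  induction n with
  | zero =>
    intro h
    rw [pv_rgo_zero] at h ⊢
    split at h
    · next hp => exact ⟨0, le_rfl, by simp [hp], pv_single_isPrefixOf.1 hp, by omega⟩
    · exact absurd rfl h
  | succ j ih =>
    intro h
    rw [pv_rgo_succ] at h ⊢
    split at h
    · next hp =>
      exact ⟨j+1, le_rfl, by simp [hp], pv_single_prefix_drop.1 hp, by omega⟩
    · next hp =>
      replace hp : s[j+1]? ≠ some c := fun hx => hp (pv_single_prefix_drop.2 hx)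
      obtain ⟨m, hm, he, hc, hmax⟩ := ih h
      refine ⟨m, by omega, by
        rw [if_neg (fun hx => (hp (pv_single_prefix_drop.1 hx)))]
        exact he, hc, fun m' h1 h2 => ?_⟩
      · rcases Nat.lt_or_ge m' (j+1) with h3 | h3
        · exact hmax m' h1 (by omega)
        · have : m' = j + 1 := by omega
          subst this; exact hp

theorem pv_rfind_no_nl {w : List Char} (h : '\n' ∉ w) : PySem.Chars.rfind w ['\n'] = -1 := by
  rw [PySem.Chars.rfind]
  exact pv_rgo_neg w '\n' w.length (fun m _ hm => h (List.mem_of_getElem? hm))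

theorem pv_rfind_append (u w : List Char) :
    PySem.Chars.rfind (u ++ '\n' :: w) ['\n'] =
      if PySem.Chars.rfind w ['\n'] = -1 then (u.length : Int)
      else (u.length : Int) + 1 + PySem.Chars.rfind w ['\n'] := by
  have hget : ∀ m : Nat, m > u.length → (u ++ '\n' :: w)[m]? = w[m - u.length - 1]? := by
    intro m hm
    rw [List.getElem?_append_right (by omega)]
    rw [show m - u.length = (m - u.length - 1) + 1 by omega]
    simp
  have hgetu : (u ++ '\n' :: w)[u.length]? = some '\n' := by
    rw [List.getElem?_append_right le_rfl]; simp
  split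
  · next hw =>
    have hnone : ∀ m : Nat, w[m]? ≠ some '\n' := by
      intro m hm
      have hlen : m < w.length := by
        by_contra hh
        rw [List.getElem?_eq_none (by omega)] at hm
        simp at hm
      exact pv_rgo_ne w '\n' w.length m (by omega) hm (by rw [PySem.Chars.rfind] at hw; exact hw)
    rw [PySem.Chars.rfind]
    exact pv_rgo_pos _ '\n' _ u.length (by simp) hgetu
      (fun m' h1 _ => by rw [hget m' h1]; exact hnone _)
  · next hw =>
    obtain ⟨m, hm, he, hc, hmax⟩ := pv_rgo_spec w '\n' w.length (by rw [PySem.Chars.rfind] at hw; exact hw)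
    rw [show PySem.Chars.rfind w ['\n'] = (m : Int) from he]
    rw [show (u.length : Int) + 1 + (m : Int) = ((u.length + 1 + m : Nat) : Int) by push_cast; ring]
    rw [PySem.Chars.rfind]
    refine pv_rgo_pos _ '\n' _ (u.length + 1 + m) (by simp; try omega)
      (by rw [hget _ (by omega), show u.length + 1 + m - u.length - 1 = m by omega]; exact hc)
      (fun m' h1 h2 => by
        rw [hget _ (by omega)]
        intro hx
        have hlen : m' - u.length - 1 < w.length := by
          by_contra hh
          rw [List.getElem?_eq_none (by omega)] at hx
          simp at hx
        exact hmax (m' - u.length - 1) (by omega) (by omega) hx)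

-- ---- splitOn ----

theorem pv_sgo_nil (sep fuel cur acc) : PySem.Chars.splitOn.go sep (fuel+1) [] cur acc = (cur.reverse :: acc).reverse := by
  simp [PySem.Chars.splitOn.go]

theorem pv_sgo_cons (sep fuel c rest cur acc) :
    PySem.Chars.splitOn.go sep (fuel+1) (c :: rest) cur acc =
      if sep.isPrefixOf (c :: rest) then PySem.Chars.splitOn.go sep fuel (List.drop sep.length (c :: rest)) [] (cur.reverse :: acc)
      else PySem.Chars.splitOn.go sep fuel rest (c :: cur) acc := by
  rw [PySem.Chars.splitOn.go]

theorem pv_splitOn_eq_splitOnP (cs : List Char) : cs.splitOn '\n' = cs.splitOnP (· == '\n') := rfl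

theorem pv_sgo_eq (l : List Char) : ∀ (fuel : Nat), l.length + 1 ≤ fuel → ∀ (cur : List Char) (acc : List (List Char)),
    PySem.Chars.splitOn.go ['\n'] fuel l cur acc
      = acc.reverse ++ List.modifyHead (cur.reverse ++ ·) (l.splitOn '\n') := by
  induction l with
  | nil =>
    intro fuel hf cur acc
    obtain ⟨f, rfl⟩ : ∃ f, fuel = f + 1 := ⟨fuel - 1, by omega⟩
    simp [pv_sgo_nil]
  | cons c rest ih =>
    intro fuel hf cur acc
    obtain ⟨f, rfl⟩ : ∃ f, fuel = f + 1 := ⟨fuel - 1, by omega⟩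
    rw [pv_sgo_cons]
    by_cases hc : c = '\n'
    · subst hc
      have hpre : (['\n'] : List Char).isPrefixOf ('\n' :: rest) = true := by
        simp [List.isPrefixOf]
      rw [if_pos hpre]
      have := ih f (by simpa using hf) [] (cur.reverse :: acc)
      simp only [List.length_cons] at *
      rw [show (List.drop (([] : List Char).length + 1) ('\n'::rest)) = rest by simp]
      rw [this]
      simp only [pv_splitOn_eq_splitOnP]
      rw [List.splitOnP_cons]
      simp only [if_pos (by simp : (('\n' == '\n') : Bool) = true), List.modifyHead_cons]
      rcases h : rest.splitOnP (fun x => x == '\n') with _ | ⟨hd, tl⟩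
      · exact absurd h (List.splitOnP_ne_nil _ _)
      · simp
    · have hpre : (['\n'] : List Char).isPrefixOf (c :: rest) = false := by
        simp [List.isPrefixOf]
        intro h; exact absurd h.symm hc
      rw [if_neg (by simp [hpre])]
      rw [ih f (by simp at hf ⊢; omega) (c :: cur) acc]
      simp only [pv_splitOn_eq_splitOnP]
      rw [List.splitOnP_cons]
      have hc' : ((c == '\n') : Bool) = false := by simp [hc]
      rw [if_neg (by simp [hc'])]
      rcases h : rest.splitOnP (fun x => x == '\n') with _ | ⟨hd, tl⟩
      · exact absurd h (List.splitOnP_ne_nil _ _)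
      · simp

theorem pv_chars_splitOn_eq (cs : List Char) :
    PySem.Chars.splitOn cs ['\n'] = cs.splitOn '\n' := by
  rw [PySem.Chars.splitOn, pv_sgo_eq cs (cs.length + 1) le_rfl]
  rcases h : cs.splitOn '\n' with _ | ⟨hd, tl⟩
  · exact absurd h (List.splitOnP_ne_nil _ _)
  · simp

-- splitOn structure lemmas
theorem pv_splitOn_single {u : List Char} (h : '\n' ∉ u) : u.splitOn '\n' = [u] := by
  rw [pv_splitOn_eq_splitOnP]
  exact List.splitOnP_eq_single _ _ (by intro x hx; simp; rintro rfl; exact h hx)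

theorem pv_splitOn_cons {u : List Char} (v : List Char) (h : '\n' ∉ u) :
    (u ++ '\n' :: v).splitOn '\n' = u :: v.splitOn '\n' := by
  rw [pv_splitOn_eq_splitOnP, pv_splitOn_eq_splitOnP]
  exact List.splitOnP_first _ _ (by intro x hx; simp; rintro rfl; exact h hx) _ (by simp) _

theorem pv_splitOn_ne_nil (cs : List Char) : cs.splitOn '\n' ≠ [] := by
  rw [pv_splitOn_eq_splitOnP]; exact List.splitOnP_ne_nil _ _

-- ---- find/rfind/findFrom ----
theorem pv_find_no_nl {w : List Char} (h : '\n' ∉ w) : PySem.Chars.find w ['\n'] = -1 :=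
  (PySem.Chars.find_eq_neg_one_iff w ['\n']).2 (fun hinf => h ((List.singleton_infix_iff _ _).1 hinf))

theorem pv_find_succeeds {w : List Char} (h : '\n' ∈ w) : PySem.Chars.find w ['\n'] ≠ -1 :=
  (PySem.Chars.find_ne_neg_one_iff w ['\n']).2 ((List.singleton_infix_iff _ _).2 h)


theorem pv_find_append {u : List Char} (v : List Char) (hu : '\n' ∉ u) :
    PySem.Chars.find (u ++ '\n' :: v) ['\n'] = (u.length : Int) := by
  set s := u ++ '\n' :: v with hs
  have hmem : '\n' ∈ s := by simp [hs]
  have h0 : 0 ≤ PySem.Chars.find s ['\n'] :=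
    (PySem.Chars.find_nonneg_iff s ['\n']).2 ((List.singleton_infix_iff _ _).2 hmem)
  obtain ⟨hpre, hmin⟩ := PySem.Chars.find_spec h0
  set f := (PySem.Chars.find s ['\n']).toNat with hf
  have hfc : s[f]? = some '\n' := by
    rw [← List.head?_drop]
    rcases hpre with ⟨t, ht⟩
    rw [← ht]; simp
  have hule : ¬ (u.length < f) := by
    intro hlt
    exact hmin u.length hlt (pv_single_prefix.2 (by
      rw [List.head?_drop, List.getElem?_append_right le_rfl]; simp))
  have hne : ¬ (f < u.length) := by
    intro hlt
    rw [List.getElem?_append_left hlt] at hfc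
    exact hu (List.mem_of_getElem? hfc)
  have : f = u.length := by omega
  omega

theorem pv_findFrom_past (s t : List Char) :
    PySem.Chars.findFrom s t ((s.length + 1 : Nat) : Int) = -1 := by
  rw [PySem.Chars.findFrom]
  push_cast
  rw [if_neg (by omega : ¬ ((s.length : Int) + 1 < 0))]
  rw [if_pos (by omega : (s.length : Int) < (s.length : Int) + 1)]

theorem pv_rfindFrom_zero (s sub : List Char) (e : Nat) (he : e ≤ s.length) :
    PySem.Chars.rfindFrom s sub 0 (some (e : Int)) = PySem.Chars.rfind (s.take e) sub := by
  rw [PySem.Chars.rfindFrom]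
  rw [if_neg (by omega : ¬ ((s.length : Int) < (e : Int)))]
  rw [if_neg (by omega : ¬ ((e : Int) < (0 : Int)))]
  rw [if_neg (by omega : ¬ ((0 : Int) < (0 : Int)))]
  rw [if_neg (by omega : ¬ ((e : Int) < (0 : Int)))]
  simp only [Int.toNat_natCast, Int.toNat_zero, List.drop_zero]
  split
  · next h => rw [h]
  · rw [zero_add]

theorem pv_lineStart_no_nl (cs : List Char) (j : Nat) (hj : j ≤ cs.length) (h : '\n' ∉ cs.take j) :
    PySem.Chars.rfindFrom cs ['\n'] 0 (some (j : Int)) + 1 = 0 := by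
  rw [pv_rfindFrom_zero cs _ j hj, pv_rfind_no_nl h]
  norm_num

-- ---- shift lemmas ----
theorem pv_drop_shift (u v : List Char) (k : Nat) :
    (u ++ '\n'::v).drop (u.length + 1 + k) = v.drop k := by
  rw [show u ++ '\n'::v = (u ++ ['\n']) ++ v by simp, List.drop_append]
  rw [List.drop_eq_nil_of_le (by simp; try omega)]
  simp

theorem pv_take_shift (u v : List Char) (k : Nat) :
    (u ++ '\n'::v).take (u.length + 1 + k) = u ++ '\n' :: v.take k := by
  rw [show u ++ '\n'::v = (u ++ ['\n']) ++ v by simp, List.take_append]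
  rw [List.take_of_length_le (by simp; try omega)]
  simp [show u.length + 1 + k - (u.length + 1) = k by omega]

theorem pv_lineStart_append (u v : List Char) (j : Nat) (hj : j ≤ v.length) :
    PySem.Chars.rfindFrom (u ++ '\n'::v) ['\n'] 0 (some ((u.length+1+j : Nat) : Int)) + 1
      = ((u.length : Int) + 1) + (PySem.Chars.rfindFrom v ['\n'] 0 (some (j : Int)) + 1) := by
  rw [pv_rfindFrom_zero _ _ _ (by simp; try omega), pv_rfindFrom_zero _ _ _ hj,
      pv_take_shift, pv_rfind_append u (v.take j)]
  split
  · next h => rw [h]; ring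
  · ring

theorem pv_getD_shift (u v : List Char) (k : Int) (hk : 0 ≤ k) (d : Char) :
    PySem.List.pyGetD (u ++ '\n'::v) (((u.length : Int) + 1) + k) d = PySem.List.pyGetD v k d := by
  obtain ⟨n, rfl⟩ : ∃ n : Nat, k = (n : Int) := ⟨k.toNat, (Int.toNat_of_nonneg hk).symm⟩
  rw [show (u.length : Int) + 1 + (n : Int) = ((u.length + 1 + n : Nat) : Int) by push_cast; ring]
  rw [PySem.List.pyGetD_natCast, PySem.List.pyGetD_natCast]
  rw [show u ++ '\n'::v = (u ++ ['\n']) ++ v by simp]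
  rw [List.getD_append_right _ _ _ _ (by simp; try omega)]
  simp [show u.length + 1 + n - (u.length + 1) = n by omega]

theorem pv_slice_shift (u v : List Char) (a b : Nat) :
    PySem.List.slice (u ++ '\n'::v) (some ((u.length+1+a : Nat) : Int)) (some ((u.length+1+b : Nat) : Int))
      = PySem.List.slice v (some (a : Int)) (some (b : Int)) := by
  rw [PySem.List.slice_natCast, PySem.List.slice_natCast, pv_drop_shift]
  congr 1
  omega

theorem pv_slice_to_neg_one (xs : List Char) (a : Nat) :
    PySem.List.slice xs (some (a : Int)) (some (-1)) = xs.dropLast.drop a := by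
  have h : PySem.List.slice xs (some (a : Int)) (some (-1))
      = List.take (PySem.List.clampIdx xs.length (-1) - PySem.List.clampIdx xs.length (a : Int))
          (List.drop (PySem.List.clampIdx xs.length (a : Int)) xs) := rfl
  rw [h, PySem.List.clampIdx_neg_one, PySem.List.clampIdx_natCast]
  rw [List.dropLast_eq_take, List.drop_take]
  rcases Nat.lt_or_ge xs.length a with hlt | hge
  · rw [min_eq_right (by omega)]
    rw [List.drop_eq_nil_of_le le_rfl, List.drop_eq_nil_of_le (by omega)]
    simp
  · rw [min_eq_left hge]

theorem pv_dropLast_drop_shift (u v : List Char) (a : Nat) :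
    (u ++ '\n'::v).dropLast.drop (u.length + 1 + a) = v.dropLast.drop a := by
  cases v with
  | nil =>
    rw [show u ++ ['\n'] = u ++ ['\n'] from rfl, List.dropLast_concat]
    rw [List.drop_eq_nil_of_le (by omega)]
    simp
  | cons c cs =>
    rw [List.dropLast_append_cons]
    rw [show ('\n' :: (c :: cs)).dropLast = '\n' :: (c :: cs).dropLast by simp]
    exact pv_drop_shift u _ a

-- A's loop characterised: the first "good" position (an occurrence of the tag whose line starts
-- with '>'), then A's tail computation.
def isGoodB (cs t : List Char) (j : Nat) : Bool :=
  t.isPrefixOf (cs.drop j)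
  && (PySem.List.pyGetD cs (PySem.Chars.rfindFrom cs ['\n'] 0 (some (j:Int)) + 1) ' ' == '>')

def firstGood (cs t : List Char) (s : Nat) : Option Nat :=
  (List.range' s (cs.length + 1 - s)).find? (isGoodB cs t)

def finishA (cs : List Char) (j : Nat) : Option (List Char) :=
  let nls := PySem.Chars.findFrom cs ['\n'] (j:Int) + 1
  if PySem.List.pyGetD cs nls ' ' = '>'
      ∨ PySem.List.slice cs (some nls) (some (nls + 4)) = ['$','$','$','$'] then
    some []
  else
    some (PySem.List.slice cs (some nls) (some (PySem.Chars.findFrom cs ['\n'] nls)))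

def specA (cs t : List Char) (s : Nat) : Option (List Char) :=
  match firstGood cs t s with
  | some j => finishA cs j
  | none => none

-- ---- find? on ranges ----
theorem pv_find?_range'_some (p : Nat → Bool) : ∀ (n s j : Nat), s ≤ j → j < s + n → p j = true →
    (∀ m, s ≤ m → m < j → p m = false) → (List.range' s n).find? p = some j := by
  intro n
  induction n with
  | zero => intro s j h1 h2; omega
  | succ n ih =>
    intro s j h1 h2 hp hmin
    rw [List.range'_succ, List.find?_cons]
    by_cases hs : j = s
    · subst hs; rw [hp]
    · rw [hmin s le_rfl (by omega)]
      exact ih (s+1) j (by omega) (by omega) hp (fun m hm1 hm2 => hmin m (by omega) hm2)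

theorem pv_find?_range'_none (p : Nat → Bool) (n s : Nat) (h : ∀ m, s ≤ m → m < s + n → p m = false) :
    (List.range' s n).find? p = none := by
  rw [List.find?_eq_none]
  intro x hx
  rw [List.mem_range'] at hx
  obtain ⟨i, hi, hx⟩ := hx
  have h1 : s ≤ x := by omega
  have h2 : x < s + n := by omega
  simp [h x h1 h2]

theorem pv_find?_range'_drop (p : Nat → Bool) : ∀ (n s s' : Nat), s ≤ s' → s' ≤ s + n →
    (∀ m, s ≤ m → m < s' → p m = false) →
    (List.range' s n).find? p = (List.range' s' (s + n - s')).find? p := by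
  intro n
  induction n with
  | zero =>
    intro s s' h1 h2 _
    have : s' = s := by omega
    subst this; simp
  | succ n ih =>
    intro s s' h1 h2 hmin
    by_cases hs : s' = s
    · subst hs; simp
    · rw [List.range'_succ, List.find?_cons, hmin s le_rfl (by omega)]
      rw [ih (s+1) s' (by omega) (by omega) (fun m hm1 hm2 => hmin m (by omega) hm2)]
      rw [show s + (n + 1) - s' = s + 1 + n - s' from by omega]

theorem pv_find?_range'_shift (p : Nat → Bool) (a n : Nat) :
    (List.range' a n).find? p = ((List.range' 0 n).find? (fun i => p (a + i))).map (a + ·) := by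
  rw [List.range'_eq_map_range (s := a), List.find?_map]
  rw [show (List.range' 0 n) = List.range n by rw [List.range'_eq_map_range]; simp]
  rfl

theorem pv_find?_congr (p q : Nat → Bool) : ∀ (l : List Nat), (∀ x ∈ l, p x = q x) → l.find? p = l.find? q := by
  intro l
  induction l with
  | nil => intro _; rfl
  | cons x xs ih =>
    intro h
    rw [List.find?_cons, List.find?_cons, h x (by simp)]
    split
    · rfl
    · exact ih (fun y hy => h y (by simp [hy]))

-- ---- rfind is ≥ -1 ----
theorem pv_rgo_ge (s sub : List Char) : ∀ (n : Nat), -1 ≤ PySem.Chars.rfind.go s sub n := by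
  intro n
  induction n with
  | zero => rw [pv_rgo_zero]; split <;> omega
  | succ j ih => rw [pv_rgo_succ]; split
                 · omega
                 · exact ih

theorem pv_lineStart_nonneg (v : List Char) (j : Nat) (hj : j ≤ v.length) :
    0 ≤ PySem.Chars.rfindFrom v ['\n'] 0 (some (j : Int)) + 1 := by
  rw [pv_rfindFrom_zero _ _ _ hj]
  have := pv_rgo_ge (v.take j) ['\n'] (v.take j).length
  rw [PySem.Chars.rfind]
  omega

-- ---- good positions: shifting across a leading line ----
theorem pv_good_shift (u v t : List Char) (j : Nat) (hj : j ≤ v.length) :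
    isGoodB (u ++ '\n'::v) t (u.length + 1 + j) = isGoodB v t j := by
  unfold isGoodB
  rw [pv_drop_shift, pv_lineStart_append u v j hj]
  rw [pv_getD_shift u v _ (pv_lineStart_nonneg v j hj) ' ']

-- ---- occurrences stay inside a newline-free line ----
theorem pv_occ_in_line {t u : List Char} (v : List Char) (ht : '\n' ∉ t) {j : Nat} (hj : j < u.length)
    (hocc : t <+: (u ++ '\n'::v).drop j) : t <+: u.drop j := by
  rw [List.drop_append, show j - u.length = 0 by omega, List.drop_zero] at hocc
  by_cases hlen : t.length ≤ u.length - j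
  · exact List.prefix_of_prefix_length_le hocc (List.prefix_append _ _) (by simp; omega)
  · exfalso
    rw [List.prefix_iff_eq_take] at hocc
    have hnl : t[u.length - j]? = some '\n' := by
      rw [hocc, List.getElem?_take_of_lt (by omega)]
      rw [List.getElem?_append_right (by simp; try omega)]
      simp
    exact ht (List.mem_of_getElem? hnl)

theorem pv_occ_boundary {t : List Char} (v : List Char) (ht : '\n' ∉ t)
    (hocc : t <+: '\n'::v) : t = [] := by
  cases t with
  | nil => rfl
  | cons c cs =>
    obtain ⟨r, hr⟩ := hocc
    simp at hr
    exact absurd (by simp [hr.1] : '\n' ∈ c :: cs) ht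

-- ---- a matching line yields a first good position ----
theorem pv_line_occ (t u : List Char) (hstart : ['>'] <+: u) (hinf : t <:+: u) :
    ∃ o : Nat, o < u.length ∧ t <+: u.drop o ∧ (∀ m < o, ¬ t <+: u.drop m) := by
  have h0 : 0 ≤ PySem.Chars.find u t :=
    (PySem.Chars.find_nonneg_iff u t).2 hinf
  obtain ⟨hpre, hmin⟩ := PySem.Chars.find_spec h0
  refine ⟨(PySem.Chars.find u t).toNat, ?_, hpre, hmin⟩
  by_cases ht0 : t = []
  · subst ht0
    rw [PySem.Chars.find_nil]
    have := hstart.length_le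
    simp at this ⊢
    omega
  · have h1 : t.length ≤ (u.drop (PySem.Chars.find u t).toNat).length := hpre.length_le
    have h2 : 1 ≤ t.length := by
      cases t with
      | nil => exact absurd rfl ht0
      | cons _ _ => simp
    simp at h1
    omega

theorem pv_take_no_nl {u : List Char} (w : List Char) (hu : '\n' ∉ u) (m : Nat) (hm : m ≤ u.length) :
    '\n' ∉ (u ++ w).take m := by
  rw [List.take_append, show m - u.length = 0 by omega, List.take_zero, List.append_nil]
  exact fun h => hu (List.mem_of_mem_take h)

theorem pv_match_good (t u w : List Char) (ht : '\n' ∉ t) (hu : '\n' ∉ u)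
    (hm : pvTagLine t u = true) :
    ∃ o : Nat, o < u.length ∧ isGoodB (u ++ w) t o = true ∧ (∀ m < o, ¬ t <+: u.drop m) := by
  rw [pvTagLine, decide_eq_true_iff] at hm
  obtain ⟨hstart, hinf⟩ := hm
  obtain ⟨o, ho, hocc, hmin⟩ := pv_line_occ t u hstart hinf
  refine ⟨o, ho, ?_, hmin⟩
  rw [isGoodB, Bool.and_eq_true]
  constructor
  · rw [List.isPrefixOf_iff_prefix]
    calc t <+: u.drop o := hocc
    _ <+: u.drop o ++ List.drop (o - u.length) w := List.prefix_append _ _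
    _ = (u ++ w).drop o := (List.drop_append).symm
  · rw [pv_lineStart_no_nl _ _ (by simp; omega) (pv_take_no_nl w hu o (by omega))]
    obtain ⟨r, hr⟩ := hstart
    rw [← hr]
    simp only [List.singleton_append, List.cons_append, PySem.List.pyGetD_zero_cons]
    simp

-- ---- no good position inside (or at the end of) a non-matching line ----
theorem pv_nomatch_nogood (t u w : List Char) (ht : '\n' ∉ t) (hu : '\n' ∉ u)
    (hw : w = [] ∨ ∃ v, w = '\n'::v) (hnm : pvTagLine t u = false) :
    ∀ m ≤ u.length, isGoodB (u ++ w) t m = false := by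
  intro m hm
  rw [isGoodB]
  by_cases hocc : t.isPrefixOf ((u ++ w).drop m) = true
  case neg => simp [hocc]
  rw [List.isPrefixOf_iff_prefix] at hocc
  rw [pv_lineStart_no_nl _ _ (by simp; omega) (pv_take_no_nl w hu m hm)]
  have hinf : t <:+: u := by
    rcases Nat.lt_or_ge m u.length with hlt | hge
    · have hocc' : t <+: u.drop m := by
        rcases hw with rfl | ⟨v, rfl⟩
        · simpa using hocc
        · exact pv_occ_in_line v ht hlt hocc
      exact (hocc'.isInfix).trans (List.drop_suffix m u).isInfix
    · have hm' : m = u.length := by omega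
      subst hm'
      rw [List.drop_append, List.drop_of_length_le le_rfl, show u.length - u.length = 0 by omega, List.drop_zero] at hocc
      have ht0 : t = [] := by
        rcases hw with rfl | ⟨v, rfl⟩
        · exact List.prefix_nil.mp (by simpa using hocc)
        · exact pv_occ_boundary v ht (by simpa using hocc)
      subst ht0
      exact List.nil_infix
  cases u with
  | nil =>
    rcases hw with rfl | ⟨v, rfl⟩
    · simp [PySem.List.pyGetD, PySem.List.pyGet?]
    · simp [PySem.List.pyGetD_zero_cons]
  | cons c cu =>
    have hc : c ≠ '>' := by
      intro hc
      subst hc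
      rw [pvTagLine, decide_eq_false_iff_not] at hnm
      exact hnm ⟨⟨cu, rfl⟩, hinf⟩
    simp [PySem.List.pyGetD_zero_cons, hc]

theorem pv_fg_match (t u w : List Char) (ht : '\n' ∉ t) (hu : '\n' ∉ u)
    (hw : w = [] ∨ ∃ v, w = '\n'::v) (hm : pvTagLine t u = true) :
    ∃ o : Nat, o < u.length ∧ firstGood (u ++ w) t 0 = some o ∧ isGoodB (u ++ w) t o = true := by
  obtain ⟨o, ho, hg, hmin⟩ := pv_match_good t u w ht hu hm
  refine ⟨o, ho, ?_, hg⟩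
  rw [firstGood]
  apply pv_find?_range'_some _ _ 0 o (by omega) (by simp; omega) hg
  intro m _ hmo
  have hoccf : t.isPrefixOf ((u ++ w).drop m) = false := by
    rw [Bool.eq_false_iff, Ne, List.isPrefixOf_iff_prefix]
    intro hocc
    refine hmin m hmo ?_
    rcases hw with rfl | ⟨v, rfl⟩
    · rw [List.drop_append, show m - u.length = 0 by omega, List.drop_zero] at hocc
      simpa using hocc
    · exact pv_occ_in_line v ht (by omega) hocc
  rw [isGoodB, hoccf, Bool.false_and]

theorem pv_fg_cons (t u v : List Char) (ht : '\n' ∉ t) (hu : '\n' ∉ u)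
    (hnm : pvTagLine t u = false) :
    firstGood (u ++ '\n'::v) t 0 = (firstGood v t 0).map (fun j => u.length + 1 + j) := by
  rw [firstGood, firstGood]
  rw [show (u ++ '\n'::v).length + 1 - 0 = (u.length + 1) + (v.length + 1) by simp; omega]
  rw [← List.range'_append (s := 0) (m := u.length + 1) (n := v.length + 1) (step := 1)]
  rw [List.find?_append]
  rw [pv_find?_range'_none _ _ _ (fun m hm1 hm2 =>
        pv_nomatch_nogood t u ('\n'::v) ht hu (Or.inr ⟨v, rfl⟩) hnm m (by omega))]
  rw [Option.none_or]
  rw [show 0 + 1 * (u.length + 1) = u.length + 1 by omega]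
  rw [pv_find?_range'_shift]
  rw [pv_find?_congr _ (isGoodB v t) _ (fun i hi => by
        have hiv : i ≤ v.length := by
          rw [List.mem_range'] at hi
          omega
        exact pv_good_shift u v t i hiv)]
  rfl

theorem loopA_eq (cs t : List Char) :
    ∀ (fuel s : Nat), s ≤ cs.length + 1 → cs.length + 2 - s ≤ fuel →
      findTagLoopA cs t s fuel = specA cs t s := by
  intro fuel
  induction fuel with
  | zero => intro s hs hf; omega
  | succ fuel ih =>
    intro s hs hf
    have hstep : findTagLoopA cs t s (fuel+1) =
        (if PySem.Chars.findFrom cs t (s : Int) = -1 then none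
         else if PySem.List.pyGetD cs (PySem.Chars.rfindFrom cs ['\n'] 0 (some (PySem.Chars.findFrom cs t (s : Int))) + 1) ' ' ≠ '>' then
           findTagLoopA cs t ((PySem.Chars.findFrom cs t (s : Int)).toNat + 1) fuel
         else
           (if PySem.List.pyGetD cs (PySem.Chars.findFrom cs ['\n'] (PySem.Chars.findFrom cs t (s : Int)) + 1) ' ' = '>'
               ∨ PySem.List.slice cs (some (PySem.Chars.findFrom cs ['\n'] (PySem.Chars.findFrom cs t (s : Int)) + 1)) (some ((PySem.Chars.findFrom cs ['\n'] (PySem.Chars.findFrom cs t (s : Int)) + 1) + 4)) = ['$','$','$','$'] then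
             some []
           else
             some (PySem.List.slice cs (some (PySem.Chars.findFrom cs ['\n'] (PySem.Chars.findFrom cs t (s : Int)) + 1)) (some (PySem.Chars.findFrom cs ['\n'] (PySem.Chars.findFrom cs ['\n'] (PySem.Chars.findFrom cs t (s : Int)) + 1))))))
      := rfl
    rw [hstep]
    rcases Nat.lt_or_ge cs.length s with hpast | hle
    · have hs1 : s = cs.length + 1 := by omega
      subst hs1
      rw [if_pos (pv_findFrom_past cs t)]
      rw [specA, firstGood, show cs.length + 1 - (cs.length + 1) = 0 by omega]
      simp
    · rw [PySem.Chars.findFrom_natCast cs t s hle]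
      by_cases hfind : PySem.Chars.find (cs.drop s) t = -1
      · rw [if_pos (by rw [hfind]; rfl)]
        have hnone : firstGood cs t s = none := by
          rw [firstGood]
          apply pv_find?_range'_none
          intro m hm1 hm2
          rw [isGoodB]
          have : t.isPrefixOf (cs.drop m) = false := by
            rw [Bool.eq_false_iff, Ne, List.isPrefixOf_iff_prefix]
            intro hocc
            have hinf : PySem.Chars.isIn t (cs.drop s) = true :=
              (PySem.Chars.exists_prefix_drop_iff_isIn t (cs.drop s)).1
                ⟨m - s, by rw [List.drop_drop, show s + (m - s) = m by omega]; exact hocc⟩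
            rw [PySem.Chars.isIn_iff_infix] at hinf
            exact absurd ((PySem.Chars.find_eq_neg_one_iff _ _).1 hfind) (by simp [hinf])
          rw [this, Bool.false_and]
        rw [specA, hnone]
      · have hge : 0 ≤ PySem.Chars.find (cs.drop s) t := by
          have := PySem.Chars.neg_one_le_find (cs.drop s) t
          omega
        set f := (PySem.Chars.find (cs.drop s) t).toNat with hfdef
        have hcast : (if PySem.Chars.find (cs.drop s) t = -1 then (-1 : Int)
            else (s : Int) + PySem.Chars.find (cs.drop s) t) = ((s + f : Nat) : Int) := by
          rw [if_neg hfind]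
          omega
        rw [hcast]
        set j := s + f with hjdef
        have hne : ¬ (((j : Nat) : Int) = -1) := by omega
        rw [if_neg hne]
        obtain ⟨hpre, hmin⟩ := PySem.Chars.find_spec (s := cs.drop s) (sub := t) hge
        have hjlen : j ≤ cs.length := by
          have h1 := PySem.Chars.find_le_length (cs.drop s) t
          have h2 : (cs.drop s).length = cs.length - s := by simp
          omega
        have hocc : t <+: cs.drop j := by
          have h := hpre
          rw [List.drop_drop] at h
          simpa [hjdef] using h
        have hnoocc : ∀ m, s ≤ m → m < j → ¬ t <+: cs.drop m := by
          intro m hm1 hm2 hx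
          refine hmin (m - s) (by omega) ?_
          rw [List.drop_drop, show s + (m - s) = m by omega]
          exact hx
        rw [Int.toNat_natCast]
        by_cases hch : PySem.List.pyGetD cs (PySem.Chars.rfindFrom cs ['\n'] 0 (some ((j : Nat) : Int)) + 1) ' ' = '>'
        · rw [if_neg (by simpa using hch)]
          have hgood : isGoodB cs t j = true := by
            rw [isGoodB, Bool.and_eq_true, List.isPrefixOf_iff_prefix]
            exact ⟨hocc, by simp [hch]⟩
          have hsome : firstGood cs t s = some j := by
            rw [firstGood]
            apply pv_find?_range'_some _ _ s j (by omega) (by omega) hgood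
            intro m hm1 hm2
            rw [isGoodB]
            have : t.isPrefixOf (cs.drop m) = false := by
              rw [Bool.eq_false_iff, Ne, List.isPrefixOf_iff_prefix]
              exact hnoocc m hm1 hm2
            rw [this, Bool.false_and]
          rw [specA, hsome]
          rfl
        · rw [if_pos (by simpa using hch)]
          rw [ih (j+1) (by omega) (by omega)]
          rw [specA, specA]
          have hskip : firstGood cs t s = firstGood cs t (j+1) := by
            rw [firstGood, firstGood]
            rw [pv_find?_range'_drop _ (cs.length + 1 - s) s (j+1) (by omega) (by omega) ?_]
            · rw [show s + (cs.length + 1 - s) - (j+1) = cs.length + 1 - (j+1) by omega]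
            · intro m hm1 hm2
              rw [isGoodB]
              by_cases hmj : m < j
              · have : t.isPrefixOf (cs.drop m) = false := by
                  rw [Bool.eq_false_iff, Ne, List.isPrefixOf_iff_prefix]
                  exact hnoocc m hm1 hmj
                rw [this, Bool.false_and]
              · have hmj' : m = j := by omega
                subst hmj'
                rw [Bool.and_eq_false_iff]
                right
                simpa using hch
          rw [hskip]

theorem pv_tagLine_eq (t line : List Char) :
    (PySem.Chars.startswith line ['>'] && PySem.Chars.isIn t line) = pvTagLine t line := by
  rw [pvTagLine]
  rw [Bool.eq_iff_iff, Bool.and_eq_true, decide_eq_true_iff]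
  rw [PySem.Chars.startswith_iff, PySem.Chars.isIn_iff_infix]

theorem pv_getLast?_cons_of_ne_nil {α : Type} (a : α) {l : List α} (h : l ≠ []) :
    (a :: l).getLast? = l.getLast? := by
  cases l with
  | nil => exact absurd rfl h
  | cons b bs => exact List.getLast?_cons_cons

theorem pv_getD_head_test (x : List Char) :
    (PySem.List.pyGetD x 0 ' ' = '>') ↔ x.head? = some '>' := by
  cases x with
  | nil => simp [PySem.List.pyGetD, PySem.List.pyGet?]
  | cons c csx => simp [PySem.List.pyGetD_zero_cons]

theorem pv_head_append (u2 v2 : List Char) :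
    (u2 ++ '\n'::v2).head? = some '>' ↔ u2.head? = some '>' := by
  cases u2 with
  | nil => simp
  | cons c cu => simp

theorem pv_take4_append (u2 v2 : List Char) :
    (u2 ++ '\n'::v2).take 4 = ['$','$','$','$'] ↔ u2.take 4 = ['$','$','$','$'] := by
  by_cases h4 : 4 ≤ u2.length
  · rw [List.take_append, show 4 - u2.length = 0 by omega, List.take_zero, List.append_nil]
  · constructor
    · intro h
      exfalso
      have : '\n' ∈ (u2 ++ '\n'::v2).take 4 := by
        rw [List.take_append]
        refine List.mem_append.2 (Or.inr ?_)
        obtain ⟨k, hk⟩ : ∃ k, 4 - u2.length = k + 1 := ⟨4 - u2.length - 1, by omega⟩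
        rw [hk]
        simp
      rw [h] at this
      simp at this
    · intro h
      exfalso
      have := congrArg List.length h
      rw [List.length_take] at this
      simp at this
      omega

theorem pv_finish_shift (u v : List Char) (hu : '\n' ∉ u) (j : Nat) (hj : j ≤ v.length)
    (hnl : '\n' ∈ v.drop j) : finishA (u ++ '\n'::v) (u.length + 1 + j) = finishA v j := by
  have hfne : PySem.Chars.find (v.drop j) ['\n'] ≠ -1 := pv_find_succeeds hnl
  have hge : 0 ≤ PySem.Chars.find (v.drop j) ['\n'] := by
    have := PySem.Chars.neg_one_le_find (v.drop j) ['\n']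
    omega
  set fv := (PySem.Chars.find (v.drop j) ['\n']).toNat with hfv
  have hfval : PySem.Chars.find (v.drop j) ['\n'] = (fv : Int) := by omega
  have hfvlt : fv < (v.drop j).length := by
    obtain ⟨hpre, _⟩ := PySem.Chars.find_spec (s := v.drop j) (sub := ['\n']) hge
    have h1 := hpre.length_le
    simp at h1 ⊢
    omega
  have hfvlen : j + fv + 1 ≤ v.length := by
    simp at hfvlt
    omega
  have hF1 : PySem.Chars.findFrom (u ++ '\n'::v) ['\n'] ((u.length + 1 + j : Nat) : Int)
      = ((u.length + 1 + j + fv : Nat) : Int) := by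
    rw [PySem.Chars.findFrom_natCast _ _ _ (by simp; omega), pv_drop_shift, hfval]
    rw [if_neg (by omega)]
    push_cast
    ring
  have hF2 : PySem.Chars.findFrom v ['\n'] ((j : Nat) : Int) = ((j + fv : Nat) : Int) := by
    rw [PySem.Chars.findFrom_natCast _ _ _ hj, hfval, if_neg (by omega)]
    push_cast
    ring
  rw [finishA, finishA, hF1, hF2]
  have ha : ((u.length + 1 + j + fv : Nat) : Int) + 1 = ((u.length + 1 + (j + fv + 1) : Nat) : Int) := by
    push_cast; ring
  have hb : ((j + fv : Nat) : Int) + 1 = ((j + fv + 1 : Nat) : Int) := by push_cast; ring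
  rw [ha, hb]
  have hgd : PySem.List.pyGetD (u ++ '\n'::v) (((u.length + 1 + (j + fv + 1) : Nat)) : Int) ' '
      = PySem.List.pyGetD v ((j + fv + 1 : Nat) : Int) ' ' := by
    rw [show ((u.length + 1 + (j + fv + 1) : Nat) : Int) = ((u.length : Int) + 1) + ((j + fv + 1 : Nat) : Int) by push_cast; ring]
    exact pv_getD_shift u v _ (by positivity) ' '
  have hsl : PySem.List.slice (u ++ '\n'::v) (some ((u.length + 1 + (j + fv + 1) : Nat) : Int))
        (some (((u.length + 1 + (j + fv + 1) : Nat) : Int) + 4))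
      = PySem.List.slice v (some ((j + fv + 1 : Nat) : Int)) (some (((j + fv + 1 : Nat) : Int) + 4)) := by
    rw [show (((u.length + 1 + (j + fv + 1) : Nat) : Int) + 4) = ((u.length + 1 + (j + fv + 1 + 4) : Nat) : Int) by push_cast; ring]
    rw [show (((j + fv + 1 : Nat) : Int) + 4) = ((j + fv + 1 + 4 : Nat) : Int) by push_cast; ring]
    exact pv_slice_shift u v (j + fv + 1) (j + fv + 1 + 4)
  rw [hgd, hsl]
  have hrest : PySem.Chars.findFrom (u ++ '\n'::v) ['\n'] ((u.length + 1 + (j + fv + 1) : Nat) : Int)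
        = if PySem.Chars.find (v.drop (j + fv + 1)) ['\n'] = -1 then (-1 : Int)
          else ((u.length + 1 + (j + fv + 1) : Nat) : Int) + PySem.Chars.find (v.drop (j + fv + 1)) ['\n'] := by
    rw [PySem.Chars.findFrom_natCast _ _ _ (by simp; omega), pv_drop_shift]
  have hrestv : PySem.Chars.findFrom v ['\n'] ((j + fv + 1 : Nat) : Int)
        = if PySem.Chars.find (v.drop (j + fv + 1)) ['\n'] = -1 then (-1 : Int)
          else ((j + fv + 1 : Nat) : Int) + PySem.Chars.find (v.drop (j + fv + 1)) ['\n'] := by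
    rw [PySem.Chars.findFrom_natCast _ _ _ hfvlen]
  split
  · rfl
  · rw [hrest, hrestv]
    by_cases hlast : PySem.Chars.find (v.drop (j + fv + 1)) ['\n'] = -1
    · rw [if_pos hlast, if_pos hlast]
      rw [pv_slice_to_neg_one, pv_slice_to_neg_one]
      rw [pv_dropLast_drop_shift]
    · rw [if_neg hlast, if_neg hlast]
      have hge2 : 0 ≤ PySem.Chars.find (v.drop (j + fv + 1)) ['\n'] := by
        have := PySem.Chars.neg_one_le_find (v.drop (j + fv + 1)) ['\n']
        omega
      set g := (PySem.Chars.find (v.drop (j + fv + 1)) ['\n']).toNat with hg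
      rw [show PySem.Chars.find (v.drop (j + fv + 1)) ['\n'] = (g : Int) by omega]
      rw [show ((u.length + 1 + (j + fv + 1) : Nat) : Int) + (g : Int) = ((u.length + 1 + (j + fv + 1 + g) : Nat) : Int) by push_cast; ring]
      rw [show ((j + fv + 1 : Nat) : Int) + (g : Int) = ((j + fv + 1 + g : Nat) : Int) by push_cast; ring]
      exact congrArg some (pv_slice_shift u v (j + fv + 1) (j + fv + 1 + g))

def pvOK (t cs : List Char) : Prop :=
  (∀ i, (cs.splitOn '\n').findIdx? (pvTagLine t) = some i →
      i + 1 < (cs.splitOn '\n').length ∧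
      (i + 2 = (cs.splitOn '\n').length →
        ∀ last, (cs.splitOn '\n').getLast? = some last →
          last ≠ [] ∧ (decide (['>'] <+: last) || last.take 4 == ['$','$','$','$']) = true))
  ∧ ((cs.splitOn '\n').findIdx? (pvTagLine t) = none → t = [] →
      (cs.splitOn '\n').getLast? ≠ some [])

theorem pv_bridge_nonl (t cs : List Char) (ht : '\n' ∉ t) (hnl : '\n' ∉ cs) :
    ((firstGood cs t 0 = none ↔ (cs.splitOn '\n').findIdx? (pvTagLine t) = none)
    ∧ (∀ j, firstGood cs t 0 = some j → '\n' ∉ cs.drop j →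
          ∀ i, (cs.splitOn '\n').findIdx? (pvTagLine t) = some i →
            i + 1 = (cs.splitOn '\n').length)
    ∧ (pvOK t cs → specA cs t 0 = pvScan t (cs.splitOn '\n'))) := by
  have hlines : cs.splitOn '\n' = [cs] := pv_splitOn_single hnl
  by_cases hm : pvTagLine t cs = true
  · obtain ⟨o, ho, hfg, hgood⟩ := pv_fg_match t cs [] ht hnl (Or.inl rfl) hm
    simp only [List.append_nil] at hfg hgood
    have hidx : (cs.splitOn '\n').findIdx? (pvTagLine t) = some 0 := by
      rw [hlines, List.findIdx?_cons, if_pos hm]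
    refine ⟨iff_of_false (by rw [hfg]; simp) (by rw [hidx]; simp), ?_, ?_⟩
    · intro j _ _ i hi
      rw [hidx] at hi
      rw [hlines]
      simp at hi ⊢
      omega
    · intro hOK
      have h1 := (hOK.1 0 hidx).1
      rw [hlines] at h1
      simp at h1
  · have hfgnone : firstGood cs t 0 = none := by
      rw [firstGood]
      apply pv_find?_range'_none
      intro m h1 h2
      have := pv_nomatch_nogood t cs [] ht hnl (Or.inl rfl) (by simpa using hm) m (by omega)
      simpa using this
    have hidx : (cs.splitOn '\n').findIdx? (pvTagLine t) = none := by
      rw [hlines, List.findIdx?_cons]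
      simp [hm]
    refine ⟨by rw [hfgnone, hidx], ?_, ?_⟩
    · intro j hj
      rw [hfgnone] at hj
      simp at hj
    · intro _
      rw [specA, hfgnone, hlines]
      have hcond : (PySem.Chars.startswith cs ['>'] && PySem.Chars.isIn t cs) = false := by
        rw [pv_tagLine_eq]
        simpa using hm
      simp [pvScan, hcond]

theorem pv_split_first_nl (cs : List Char) (hnl : '\n' ∈ cs) :
    ∃ u v, '\n' ∉ u ∧ cs = u ++ '\n'::v := by
  have hdw : cs.dropWhile (fun c => !(c == '\n')) ≠ [] := by
    intro h0
    rw [List.dropWhile_eq_nil_iff] at h0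
    have := h0 '\n' hnl
    simp at this
  obtain ⟨w, hw⟩ : ∃ w, cs.dropWhile (fun c => !(c == '\n')) = '\n'::w := by
    cases hd : cs.dropWhile (fun c => !(c == '\n')) with
    | nil => exact absurd hd hdw
    | cons c w =>
      have h2 := List.head_dropWhile_not (fun c => !(c == '\n')) hdw
      simp only [hd, List.head_cons] at h2
      simp at h2
      exact ⟨w, by rw [h2]⟩
  refine ⟨cs.takeWhile (fun c => !(c == '\n')), w, ?_, ?_⟩
  · intro hx
    have := List.mem_takeWhile_imp hx
    simp at this
  · conv_lhs => rw [← List.takeWhile_append_dropWhile (p := fun c => !(c == '\n')) (l := cs)]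
    rw [hw]

theorem pv_bridge (t : List Char) (ht : '\n' ∉ t) :
    ∀ (n : Nat) (cs : List Char), cs.length ≤ n →
      ((firstGood cs t 0 = none ↔ (cs.splitOn '\n').findIdx? (pvTagLine t) = none)
      ∧ (∀ j, firstGood cs t 0 = some j → '\n' ∉ cs.drop j →
            ∀ i, (cs.splitOn '\n').findIdx? (pvTagLine t) = some i →
              i + 1 = (cs.splitOn '\n').length)
      ∧ (pvOK t cs → specA cs t 0 = pvScan t (cs.splitOn '\n'))) := by
  intro n
  induction n with
  | zero =>
    intro cs hcs
    have : cs = [] := by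
      cases cs with
      | nil => rfl
      | cons a l => simp at hcs
    subst this
    exact pv_bridge_nonl t [] ht (by simp)
  | succ n ih =>
    intro cs hcs
    by_cases hnl : '\n' ∈ cs
    case neg => exact pv_bridge_nonl t cs ht hnl
    obtain ⟨u, w, hu, hdecomp⟩ := pv_split_first_nl cs hnl
    rw [hdecomp] at hcs
    clear hnl
    subst hdecomp
    have hwlen : w.length ≤ n := by simp at hcs; omega
    obtain ⟨ih1, ih2, ih3⟩ := ih w hwlen
    have hlines : (u ++ '\n'::w).splitOn '\n' = u :: w.splitOn '\n' := pv_splitOn_cons w hu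
    have hL'ne : w.splitOn '\n' ≠ [] := pv_splitOn_ne_nil w
    by_cases hm : pvTagLine t u = true
    · obtain ⟨o, ho, hfg, hgood⟩ := pv_fg_match t u ('\n'::w) ht hu (Or.inr ⟨w, rfl⟩) hm
      have hidx : ((u ++ '\n'::w).splitOn '\n').findIdx? (pvTagLine t) = some 0 := by
        rw [hlines, List.findIdx?_cons, if_pos hm]
      refine ⟨iff_of_false (by rw [hfg]; simp) (by rw [hidx]; simp), ?_, ?_⟩
      · intro j hj hdrop i hi
        exfalso
        rw [hfg] at hj
        have hjo : j = o := by simpa using hj.symm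
        refine hdrop ?_
        rw [hjo, List.drop_append, show o - u.length = 0 by omega, List.drop_zero]
        simp
      · intro hOK
        simp only [specA, hfg]
        have hfind1 : PySem.Chars.findFrom (u ++ '\n'::w) ['\n'] ((o : Nat) : Int) + 1
            = ((u.length + 1 + 0 : Nat) : Int) := by
          rw [PySem.Chars.findFrom_natCast _ _ o (by simp; omega)]
          rw [List.drop_append, show o - u.length = 0 by omega, List.drop_zero]
          rw [pv_find_append w (fun hx => hu (List.mem_of_mem_drop hx))]
          rw [if_neg (by simp)]
          push_cast
          simp
          omega
        rw [finishA, hfind1]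
        have hgd0 : PySem.List.pyGetD (u ++ '\n'::w) ((u.length + 1 + 0 : Nat) : Int) ' '
            = PySem.List.pyGetD w 0 ' ' := by
          rw [show ((u.length + 1 + 0 : Nat) : Int) = ((u.length : Int) + 1) + ((0 : Nat) : Int) by push_cast; ring]
          exact pv_getD_shift u w _ (by positivity) ' '
        have hsl0 : PySem.List.slice (u ++ '\n'::w) (some ((u.length + 1 + 0 : Nat) : Int))
              (some (((u.length + 1 + 0 : Nat) : Int) + 4))
            = w.take 4 := by
          rw [show (((u.length + 1 + 0 : Nat) : Int) + 4) = ((u.length + 1 + 4 : Nat) : Int) by push_cast; ring]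
          rw [show ((u.length + 1 + 0 : Nat) : Int) = ((u.length + 1 + 0 : Nat) : Int) from rfl]
          rw [pv_slice_shift u w 0 4]
          rw [PySem.List.slice_natCast]
          simp
        rw [hgd0, hsl0]
        have hbcond : (PySem.Chars.startswith u ['>'] && PySem.Chars.isIn t u) = true := by
          rw [pv_tagLine_eq]; exact hm
        have hfindrest : PySem.Chars.findFrom (u ++ '\n'::w) ['\n'] ((u.length + 1 + 0 : Nat) : Int)
            = if PySem.Chars.find w ['\n'] = -1 then (-1 : Int)
              else ((u.length + 1 + 0 : Nat) : Int) + PySem.Chars.find w ['\n'] := by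
          rw [PySem.Chars.findFrom_natCast _ _ _ (by simp; try omega), pv_drop_shift]
          simp
        rw [hlines]
        simp only [pvScan, hbcond, if_true]
        by_cases hwnl : '\n' ∈ w
        · obtain ⟨u2, v2, hu2, rfl⟩ := pv_split_first_nl w hwnl
          rw [pv_splitOn_cons v2 hu2]
          dsimp only
          have hgdiff : (PySem.List.pyGetD (u2 ++ '\n'::v2) 0 ' ' = '>')
              ↔ PySem.Chars.startswith u2 ['>'] = true := by
            rw [pv_getD_head_test, pv_head_append, PySem.Chars.startswith_iff, pv_single_prefix]
          have htdiff : ((u2 ++ '\n'::v2).take 4 = ['$','$','$','$'])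
              ↔ (PySem.List.slice u2 none (some 4) == ['$','$','$','$']) = true := by
            rw [pv_take4_append, beq_iff_eq, PySem.List.slice_to u2 (by norm_num)]
            exact Iff.rfl
          by_cases hc1 : PySem.List.pyGetD (u2 ++ '\n'::v2) 0 ' ' = '>' ∨ (u2 ++ '\n'::v2).take 4 = ['$','$','$','$']
          · rw [if_pos hc1]
            have : (PySem.Chars.startswith u2 ['>'] || PySem.List.slice u2 none (some 4) == ['$','$','$','$']) = true := by
              rw [Bool.or_eq_true]
              rcases hc1 with h | h
              · exact Or.inl (hgdiff.1 h)
              · exact Or.inr (htdiff.1 h)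
            rw [if_pos this]
          · rw [if_neg hc1]
            have hbfalse : (PySem.Chars.startswith u2 ['>'] || PySem.List.slice u2 none (some 4) == ['$','$','$','$']) = false := by
              rw [Bool.or_eq_false_iff]
              constructor
              · rw [Bool.eq_false_iff]
                intro hx
                exact hc1 (Or.inl (hgdiff.2 hx))
              · rw [Bool.eq_false_iff]
                intro hx
                exact hc1 (Or.inr (htdiff.2 hx))
            rw [if_neg (by simp [hbfalse])]
            rw [hfindrest, pv_find_append v2 hu2, if_neg (by omega)]
            rw [show ((u.length + 1 + 0 : Nat) : Int) + (u2.length : Int) = ((u.length + 1 + u2.length : Nat) : Int) by push_cast; ring]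
            rw [pv_slice_shift u (u2 ++ '\n'::v2) 0 u2.length]
            rw [PySem.List.slice_natCast]
            simp only [List.drop_zero, Nat.sub_zero]
            rw [List.take_left]
        · rw [pv_splitOn_single hwnl]
          dsimp only
          have hcondiff : (PySem.List.pyGetD w 0 ' ' = '>' ∨ w.take 4 = ['$','$','$','$'])
              ↔ (PySem.Chars.startswith w ['>'] || PySem.List.slice w none (some 4) == ['$','$','$','$']) = true := by
            rw [Bool.or_eq_true, PySem.Chars.startswith_iff, pv_single_prefix, pv_getD_head_test,
                beq_iff_eq, PySem.List.slice_to w (by norm_num)]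
            exact Iff.rfl
          by_cases hc1 : PySem.List.pyGetD w 0 ' ' = '>' ∨ w.take 4 = ['$','$','$','$']
          · rw [if_pos hc1, if_pos (hcondiff.1 hc1)]
          · exfalso
            have h0 := hOK.1 0 hidx
            rw [hlines, pv_splitOn_single hwnl] at h0
            obtain ⟨hne, hor⟩ := h0.2 (by simp) w (by simp)
            rw [Bool.or_eq_true] at hor
            rcases hor with hx | hx
            · rw [decide_eq_true_iff, pv_single_prefix] at hx
              exact hc1 (Or.inl ((pv_getD_head_test w).2 hx))
            · rw [beq_iff_eq] at hx
              exact hc1 (Or.inr hx)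
    · replace hm : pvTagLine t u = false := by simpa using hm
      have hfgc := pv_fg_cons t u w ht hu hm
      have hidxc : ((u ++ '\n'::w).splitOn '\n').findIdx? (pvTagLine t)
          = ((w.splitOn '\n').findIdx? (pvTagLine t)).map (· + 1) := by
        rw [hlines, List.findIdx?_cons, hm]
        simp
      have hgl : ((u ++ '\n'::w).splitOn '\n').getLast? = (w.splitOn '\n').getLast? := by
        rw [hlines, pv_getLast?_cons_of_ne_nil u hL'ne]
      refine ⟨?_, ?_, ?_⟩
      · rw [hfgc, hidxc]
        simp [ih1]
      · intro j hj hdrop i hi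
        rw [hfgc] at hj
        obtain ⟨j', hj', rfl⟩ := Option.map_eq_some_iff.1 hj
        rw [hidxc] at hi
        obtain ⟨i', hi', rfl⟩ := Option.map_eq_some_iff.1 hi
        rw [pv_drop_shift] at hdrop
        have := ih2 j' hj' hdrop i' hi'
        rw [hlines]
        simp
        omega
      · intro hOK
        have hOKw : pvOK t w := by
          constructor
          · intro i' hi'
            have h2 := hOK.1 (i' + 1) (by rw [hidxc, hi']; rfl)
            rw [hlines] at h2
            simp at h2
            refine ⟨by omega, ?_⟩
            intro hlen last hlast
            have h3 := h2.2 (by omega) last (by rw [pv_getLast?_cons_of_ne_nil u hL'ne]; exact hlast)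
            refine ⟨h3.1, ?_⟩
            rcases h3.2 with h | h <;> simp [h]
          · intro hnone ht0
            have h2 := hOK.2 (by rw [hidxc, hnone]; rfl) ht0
            rw [hgl] at h2
            exact h2
        cases hfw : firstGood w t 0 with
        | none =>
          rw [specA, hfgc, hfw]
          have hB := ih3 hOKw
          rw [specA, hfw] at hB
          rw [hlines]
          have hcond : (PySem.Chars.startswith u ['>'] && PySem.Chars.isIn t u) = false := by
            rw [pv_tagLine_eq]; exact hm
          simp only [pvScan, hcond]
          simp only [Bool.false_eq_true, if_false]
          exact hB
        | some j' =>
          have hj'len : j' ≤ w.length := by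
            have hmem := List.mem_of_find?_eq_some hfw
            rw [List.mem_range'] at hmem
            omega
          simp only [specA, hfgc, hfw, Option.map_some]
          have hcond : (PySem.Chars.startswith u ['>'] && PySem.Chars.isIn t u) = false := by
            rw [pv_tagLine_eq]; exact hm
          rw [hlines]
          simp only [pvScan, hcond, Bool.false_eq_true, if_false]
          by_cases hdnl : '\n' ∈ w.drop j'
          · rw [pv_finish_shift u w hu j' hj'len hdnl]
            have hB := ih3 hOKw
            simp only [specA, hfw] at hB
            exact hB
          · exfalso
            cases hfi : (w.splitOn '\n').findIdx? (pvTagLine t) with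
            | none =>
              rw [← ih1] at hfi
              rw [hfw] at hfi
              simp at hfi
            | some i' =>
              have hlast := ih2 j' hfw hdnl i' hfi
              have := (hOKw.1 i' hfi).1
              omega

-- ---- glue: the compact D_/Pre_ predicate vs the proof-side pvTagLine ----
theorem pv_pred_eq (t l : List Char) :
    (l.head? == some '>' && decide (t <:+: l)) = pvTagLine t l := by
  rw [pvTagLine, Bool.eq_iff_iff, Bool.and_eq_true, beq_iff_eq, decide_eq_true_iff,
      decide_eq_true_iff, pv_single_prefix]

theorem pv_chunk_no_nl : ∀ (n : Nat) (cs : List Char), cs.length ≤ n →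
    ∀ l ∈ cs.splitOn '\n', '\n' ∉ l := by
  intro n
  induction n with
  | zero =>
    intro cs h l hl
    have hcs : cs = [] := List.eq_nil_of_length_eq_zero (by omega)
    subst hcs
    simp [List.splitOn] at hl
    subst hl
    simp
  | succ n ih =>
    intro cs h l hl
    by_cases hnl : '\n' ∈ cs
    · obtain ⟨u, v, hu, rfl⟩ := pv_split_first_nl cs hnl
      rw [pv_splitOn_cons v hu] at hl
      rcases List.mem_cons.1 hl with rfl | hl'
      · exact hu
      · exact ih v (by simp at h; omega) l hl'
    · rw [pv_splitOn_single hnl] at hl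
      simp at hl
      subst hl
      exact hnl

theorem pv_scan_none (t : List Char) : ∀ L : List (List Char),
    (∀ l ∈ L, (PySem.Chars.startswith l ['>'] && PySem.Chars.isIn t l) = false) →
    pvScan t L = none := by
  intro L
  induction L with
  | nil => intro _; rfl
  | cons line rest ih =>
    intro h
    have hc := h line (by simp)
    simp only [pvScan, hc, Bool.false_eq_true, if_false]
    exact ih (fun l hl => h l (by simp [hl]))

theorem pv_fg_none_of_not_infix (cs t : List Char) (h : ¬ t <:+: cs) : firstGood cs t 0 = none := by
  rw [firstGood]
  apply pv_find?_range'_none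
  intro m _ _
  rw [isGoodB]
  have hx : t.isPrefixOf (cs.drop m) = false := by
    rw [Bool.eq_false_iff, Ne, List.isPrefixOf_iff_prefix]
    intro hp
    exact h (hp.isInfix.trans (List.drop_suffix m cs).isInfix)
  rw [hx, Bool.false_and]


-- ---- the port of B equals the simple scan pvScan ----
theorem pv_scan_eq (t : List Char) (lines : List (List Char)) :
    ∀ (rest : List (List Char)) (i : Nat), rest = lines.drop i →
      scanLinesB t lines i rest = pvScan t rest := by
  intro rest
  induction rest with
  | nil => intro i _; rfl
  | cons line rest' ih =>
    intro i h
    have hlt : i < lines.length := by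
      by_contra hh
      rw [List.drop_eq_nil_of_le (by omega)] at h
      exact List.cons_ne_nil _ _ h
    have hlen : lines.length = i + 1 + rest'.length := by
      have := congrArg List.length h
      simp [List.length_drop] at this
      omega
    have htail : rest' = lines.drop (i + 1) := by
      rw [← List.tail_drop, ← h, List.tail_cons]
    cases hc : (PySem.Chars.startswith line ['>'] && PySem.Chars.isIn t line) with
    | false =>
      simp only [scanLinesB, pvScan, hc, Bool.false_eq_true, if_false]
      exact ih (i + 1) htail
    | true =>
      simp only [scanLinesB, pvScan, hc, if_true]
      cases rest' with
      | nil =>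
        rw [if_pos (by simp at hlen ⊢; omega)]
      | cons nxt rest'' =>
        rw [if_neg (by simp at hlen ⊢; omega)]
        have hidx : PySem.List.pyGet? lines ((i : Int) + 1) = some nxt := by
          rw [show ((i : Int) + 1) = ((i + 1 : Nat) : Int) by push_cast; ring,
              PySem.List.pyGet?_natCast, ← List.head?_drop, ← htail]
          rfl
        rw [hidx]

-- ---- D_ equals its character-level restatement pvDB ----
theorem pv_sw_gt (s : List Char) : PySem.Chars.startswith s ['>'] = decide (['>'] <+: s) := by
  rw [Bool.eq_iff_iff, PySem.Chars.startswith_iff, decide_eq_true_iff]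

theorem pv_tagLine_eq' (t x : List Char) :
    (decide (['>'] <+: x) && PySem.Chars.isIn t x) = pvTagLine t x := by
  rw [← pv_tagLine_eq, pv_sw_gt]

theorem pv_sw_take4 (s : List Char) :
    PySem.Chars.startswith s ['$','$','$','$'] = (s.take 4 == ['$','$','$','$']) := by
  rw [Bool.eq_iff_iff, PySem.Chars.startswith_iff, beq_iff_eq, List.prefix_iff_eq_take]
  exact ⟨fun h => h.symm, fun h => h.symm⟩

theorem pv_D_iff (rec tag_substr : String) :
    D_find_tag_data_py rec tag_substr ↔ pvDB tag_substr.toList (rec.toList.splitOn '\n') = true := by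
  unfold D_find_tag_data_py pvDB
  have h1 : Option.map (List.map String.toList) (PySem.Str.split? rec "\n")
      = some (rec.toList.splitOn '\n') := by
    rw [PySem.Str.split?_map, show "\n".toList = ['\n'] from by decide]
    simp [PySem.Chars.split?, pv_chars_splitOn_eq]
  obtain ⟨L0, hL0, hmap⟩ : ∃ L0, PySem.Str.split? rec "\n" = some L0
      ∧ L0.map String.toList = rec.toList.splitOn '\n' := by
    cases hx : PySem.Str.split? rec "\n" with
    | none => rw [hx] at h1; simp at h1
    | some L0 =>
      rw [hx] at h1
      simp at h1
      exact ⟨L0, rfl, h1⟩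
  rw [← hmap]
  simp only [hL0, Option.getD_some, PySem.Str.startswith_eq, PySem.Str.isIn_eq,
    show ">".toList = ['>'] from by decide, show "$$$$".toList = ['$','$','$','$'] from by decide,
    List.findIdx?_map, List.getElem?_map, Option.all_map, List.length_map, Function.comp_def,
    pv_sw_take4, pv_sw_gt, pv_tagLine_eq']


-- ---- tightness machinery: A and B computed inside D_ ----
theorem pv_findIdx?_get {α : Type} (p : α → Bool) : ∀ (l : List α) (i : Nat),
    l.findIdx? p = some i → ∃ x, l[i]? = some x ∧ p x = true := by
  intro l
  induction l with
  | nil => intro i h; simp at h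
  | cons a l' ih =>
    intro i h
    rw [List.findIdx?_cons] at h
    by_cases hp : p a = true
    · rw [if_pos hp] at h
      have h0 : i = 0 := by simpa using (Option.some.inj h).symm
      subst h0
      exact ⟨a, rfl, hp⟩
    · rw [if_neg hp] at h
      obtain ⟨i', hi', rfl⟩ := Option.map_eq_some_iff.1 h
      obtain ⟨x, hx, hpx⟩ := ih i' hi'
      exact ⟨x, by simpa using hx, hpx⟩

theorem pv_finishA_some (cs : List Char) (j : Nat) : ∃ v, finishA cs j = some v := by
  rw [finishA]
  split
  · exact ⟨_, rfl⟩
  · exact ⟨_, rfl⟩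

theorem pv_scan_at (t : List Char) : ∀ (L : List (List Char)) (i : Nat),
    L.findIdx? (pvTagLine t) = some i →
    pvScan t L = (match L.drop (i+1) with
      | [] => none
      | nxt :: _ =>
        if PySem.Chars.startswith nxt ['>'] || PySem.List.slice nxt none (some 4) == ['$','$','$','$'] then
          some []
        else some nxt) := by
  intro L
  induction L with
  | nil => intro i h; simp at h
  | cons line L' ih =>
    intro i h
    rw [List.findIdx?_cons] at h
    by_cases hm : pvTagLine t line = true
    · rw [if_pos hm] at h
      have h0 : i = 0 := by simpa using (Option.some.inj h).symm
      subst h0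
      have hcond : (PySem.Chars.startswith line ['>'] && PySem.Chars.isIn t line) = true := by
        rw [pv_tagLine_eq]; exact hm
      simp only [pvScan, hcond, if_true, List.drop_succ_cons, List.drop_zero]
    · replace hm : pvTagLine t line = false := by simpa using hm
      rw [if_neg (by simp [hm])] at h
      obtain ⟨i', hi', rfl⟩ := Option.map_eq_some_iff.1 h
      have hcond : (PySem.Chars.startswith line ['>'] && PySem.Chars.isIn t line) = false := by
        rw [pv_tagLine_eq]; exact hm
      simp only [pvScan, hcond, Bool.false_eq_true, if_false, List.drop_succ_cons]
      exact ih i' hi'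

theorem pv_diffA (t : List Char) (ht : '\n' ∉ t) :
    ∀ (n : Nat) (cs : List Char), cs.length ≤ n →
      ∀ i, (cs.splitOn '\n').findIdx? (pvTagLine t) = some i →
        i + 2 = (cs.splitOn '\n').length →
        ∀ last, (cs.splitOn '\n').getLast? = some last →
          (decide (['>'] <+: last) || last.take 4 == ['$','$','$','$']) = false →
          specA cs t 0 = some last.dropLast := by
  intro n
  induction n with
  | zero =>
    intro cs hcs i hi hlen last _ _
    have hnil : cs = [] := by
      cases cs with
      | nil => rfl
      | cons a l => simp at hcs
    subst hnil
    rw [pv_splitOn_single (by simp)] at hlen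
    simp at hlen
  | succ n ih =>
    intro cs hcs i hi hlen last hlast hbad
    by_cases hnl : '\n' ∈ cs
    case neg =>
      rw [pv_splitOn_single hnl] at hlen
      simp at hlen
    obtain ⟨u, w, hu, hdecomp⟩ := pv_split_first_nl cs hnl
    rw [hdecomp] at hcs
    clear hnl
    subst hdecomp
    have hwlen : w.length ≤ n := by simp at hcs; omega
    have hlines : (u ++ '\n'::w).splitOn '\n' = u :: w.splitOn '\n' := pv_splitOn_cons w hu
    have hL'ne : w.splitOn '\n' ≠ [] := pv_splitOn_ne_nil w
    by_cases hm : pvTagLine t u = true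
    · -- the first line matches: exactly two lines, the last one unterminated
      rw [hlines, List.findIdx?_cons, if_pos hm] at hi
      have hi0 : i = 0 := by simpa using (Option.some.inj hi).symm
      subst hi0
      by_cases hwnl : '\n' ∈ w
      · exfalso
        obtain ⟨u2, v2, hu2, rfl⟩ := pv_split_first_nl w hwnl
        rw [hlines, pv_splitOn_cons v2 hu2] at hlen
        cases hv : v2.splitOn '\n' with
        | nil => exact pv_splitOn_ne_nil v2 hv
        | cons a l =>
          rw [hv] at hlen
          simp at hlen
      have hlw : w = last := by
        rw [hlines, pv_splitOn_single hwnl] at hlast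
        simpa using hlast
      subst hlw
      obtain ⟨o, ho, hfg, hgood⟩ := pv_fg_match t u ('\n'::w) ht hu (Or.inr ⟨w, rfl⟩) hm
      simp only [specA, hfg]
      have hfind1 : PySem.Chars.findFrom (u ++ '\n'::w) ['\n'] ((o : Nat) : Int) + 1
          = ((u.length + 1 + 0 : Nat) : Int) := by
        rw [PySem.Chars.findFrom_natCast _ _ o (by simp; omega)]
        rw [List.drop_append, show o - u.length = 0 by omega, List.drop_zero]
        rw [pv_find_append w (fun hx => hu (List.mem_of_mem_drop hx))]
        rw [if_neg (by simp)]
        push_cast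
        simp
        omega
      rw [finishA, hfind1]
      have hgd0 : PySem.List.pyGetD (u ++ '\n'::w) ((u.length + 1 + 0 : Nat) : Int) ' '
          = PySem.List.pyGetD w 0 ' ' := by
        rw [show ((u.length + 1 + 0 : Nat) : Int) = ((u.length : Int) + 1) + ((0 : Nat) : Int) by push_cast; ring]
        exact pv_getD_shift u w _ (by positivity) ' '
      have hsl0 : PySem.List.slice (u ++ '\n'::w) (some ((u.length + 1 + 0 : Nat) : Int))
            (some (((u.length + 1 + 0 : Nat) : Int) + 4))
          = w.take 4 := by
        rw [show (((u.length + 1 + 0 : Nat) : Int) + 4) = ((u.length + 1 + 4 : Nat) : Int) by push_cast; ring]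
        rw [show ((u.length + 1 + 0 : Nat) : Int) = ((u.length + 1 + 0 : Nat) : Int) from rfl]
        rw [pv_slice_shift u w 0 4]
        rw [PySem.List.slice_natCast]
        simp
      rw [hgd0, hsl0]
      have hc1 : ¬ (PySem.List.pyGetD w 0 ' ' = '>' ∨ w.take 4 = ['$','$','$','$']) := by
        rw [Bool.or_eq_false_iff] at hbad
        rintro (h | h)
        · rw [pv_getD_head_test] at h
          rw [decide_eq_false_iff_not] at hbad
          exact hbad.1 (pv_single_prefix.2 h)
        · have h2 := hbad.2
          rw [beq_eq_false_iff_ne] at h2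
          exact h2 h
      rw [if_neg hc1]
      have hfindrest : PySem.Chars.findFrom (u ++ '\n'::w) ['\n'] ((u.length + 1 + 0 : Nat) : Int)
          = if PySem.Chars.find w ['\n'] = -1 then (-1 : Int)
            else ((u.length + 1 + 0 : Nat) : Int) + PySem.Chars.find w ['\n'] := by
        rw [PySem.Chars.findFrom_natCast _ _ _ (by simp), pv_drop_shift]
        simp
      rw [hfindrest, pv_find_no_nl hwnl, if_pos rfl]
      rw [pv_slice_to_neg_one, pv_dropLast_drop_shift, List.drop_zero]
    · -- the first line does not match: recurse into w
      replace hm : pvTagLine t u = false := by simpa using hm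
      have hidxc : ((u ++ '\n'::w).splitOn '\n').findIdx? (pvTagLine t)
          = ((w.splitOn '\n').findIdx? (pvTagLine t)).map (· + 1) := by
        rw [hlines, List.findIdx?_cons, hm]
        simp
      rw [hidxc] at hi
      obtain ⟨i', hi', rfl⟩ := Option.map_eq_some_iff.1 hi
      have hfgc := pv_fg_cons t u w ht hu hm
      have hlen' : i' + 2 = (w.splitOn '\n').length := by
        rw [hlines] at hlen
        simp at hlen
        omega
      have hlast' : (w.splitOn '\n').getLast? = some last := by
        rw [hlines, pv_getLast?_cons_of_ne_nil u hL'ne] at hlast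
        exact hlast
      have hres := ih w hwlen i' hi' hlen' last hlast' hbad
      cases hfw : firstGood w t 0 with
      | none =>
        exfalso
        rw [(pv_bridge t ht n w hwlen).1] at hfw
        rw [hfw] at hi'
        simp at hi'
      | some j' =>
        have hj'len : j' ≤ w.length := by
          have hmem := List.mem_of_find?_eq_some hfw
          rw [List.mem_range'] at hmem
          omega
        simp only [specA, hfgc, hfw, Option.map_some]
        by_cases hdnl : '\n' ∈ w.drop j'
        · rw [pv_finish_shift u w hu j' hj'len hdnl]
          simp only [specA, hfw] at hres
          exact hres
        · exfalso
          have h1 := (pv_bridge t ht n w hwlen).2.1 j' hfw hdnl i' hi'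
          omega

-- ===== VERDICT (by name: the statement is the Claim_ definition above) =====
theorem find_tag_data_py_spec : Claim_unchanged_find_tag_data_py := by
  intro rec tag hDom hPre hD
  obtain ⟨hPre1, hPre2⟩ := hPre
  rw [pv_D_iff] at hD
  unfold pvDB at hD
  set cs := rec.toList with hcs
  set t := tag.toList with ht
  replace hPre2 : (((cs.splitOn '\n').findIdx? fun l => l.head? == some '>' && decide (t <:+: l)).elim
      (t.isEmpty && ((cs.splitOn '\n').getLast? == some []))
      (fun i => i + 2 == (cs.splitOn '\n').length && ((cs.splitOn '\n').getLast? == some []))) = false := hPre2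
  have hcore : specA cs t 0 = pvScan t (cs.splitOn '\n') := by
    by_cases hnt : '\n' ∈ t
    · -- the tag contains a newline; by Pre_ it then does not occur in rec: both sides return none
      have hni : ¬ t <:+: cs := by
        intro hinf
        rw [show t.contains '\n' = true by simp [hnt],
            decide_eq_true hinf] at hPre1
        simp at hPre1
      rw [specA, pv_fg_none_of_not_infix cs t hni]
      refine (pv_scan_none t _ ?_).symm
      intro l hl
      have hlnl : '\n' ∉ l := pv_chunk_no_nl cs.length cs le_rfl l hl
      rw [Bool.and_eq_false_iff]
      right
      rw [Bool.eq_false_iff, Ne, PySem.Chars.isIn_iff_infix]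
      intro hinf
      exact hlnl (hinf.mem hnt)
    · -- newline-free tag: the line-level bridge applies; pvOK follows from Pre_ and ¬ D_
      have hpred : (fun l : List Char => l.head? == some '>' && decide (t <:+: l)) = pvTagLine t :=
        funext (pv_pred_eq t)
      rw [hpred] at hPre2
      have hOK : pvOK t cs := by
        constructor
        · intro i hi
          rw [hi] at hD
          simp only [Option.any_some] at hD
          cases hnx : (cs.splitOn '\n')[i+1]? with
          | none =>
            exfalso
            apply hD
            rw [hnx]
            rfl
          | some l0 =>
            have hlt : i + 1 < (cs.splitOn '\n').length := by
              by_contra hh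
              rw [List.getElem?_eq_none (by omega)] at hnx
              simp at hnx
            refine ⟨hlt, ?_⟩
            intro hlen last hlast
            have hgl : (cs.splitOn '\n').getLast? = some l0 := by
              rw [List.getLast?_eq_getElem?, show (cs.splitOn '\n').length - 1 = i + 1 by omega, hnx]
            have hlast0 : last = l0 := by
              rw [hgl] at hlast
              exact (Option.some.inj hlast).symm
            subst hlast0
            refine ⟨?_, ?_⟩
            · -- a last line failing the '>'/'$$$$' test would put the input inside D_
              intro h0
              subst h0
              apply hD
              rw [hnx]
              show Option.all _ (some []) = true
              simp only [Option.all_some]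
              rw [Bool.and_eq_true]
              exact ⟨by simp [hlen], by decide⟩
            · by_contra hg
              apply hD
              rw [hnx]
              show Option.all _ (some last) = true
              simp only [Option.all_some]
              rw [Bool.and_eq_true]
              exact ⟨by simp [hlen], by simp [Bool.eq_false_iff.2 hg]⟩
        · intro hnone ht0
          rw [hnone] at hPre2
          simp only [Option.elim_none] at hPre2
          rw [show t.isEmpty = true by simp [ht0]] at hPre2
          simp only [Bool.true_and] at hPre2
          intro hgl
          rw [hgl] at hPre2
          simp at hPre2
      exact (pv_bridge t hnt cs.length cs le_rfl).2.2 hOK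
  show find_tag_data_py rec tag = find_tag_data_py_alt rec tag
  rw [find_tag_data_py, find_tag_data_py_alt,
      loopA_eq rec.toList tag.toList (rec.toList.length + 2) 0 (by omega) (by omega),
      pv_chars_splitOn_eq,
      pv_scan_eq tag.toList (rec.toList.splitOn '\n') (rec.toList.splitOn '\n') 0 (by simp),
      hcore]

theorem find_tag_data_py_changed : Claim_changed_find_tag_data_py := by
  unfold Claim_changed_find_tag_data_py
  decide

theorem find_tag_data_py_tight : Claim_exact_find_tag_data_py := by
  intro rec tag hDom hPre hD
  obtain ⟨hPre1, hPre2⟩ := hPre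
  rw [pv_D_iff] at hD
  unfold pvDB at hD
  set cs := rec.toList with hcs
  set t := tag.toList with htdef
  replace hPre2 : (((cs.splitOn '\n').findIdx? fun l => l.head? == some '>' && decide (t <:+: l)).elim
      (t.isEmpty && ((cs.splitOn '\n').getLast? == some []))
      (fun i => i + 2 == (cs.splitOn '\n').length && ((cs.splitOn '\n').getLast? == some []))) = false := hPre2
  cases hidx : (cs.splitOn '\n').findIdx? (pvTagLine t) with
  | none =>
    rw [hidx] at hD
    simp at hD
  | some i =>
    rw [hidx] at hD
    simp only [Option.any_some] at hD
    obtain ⟨l, hl, hpl⟩ := pv_findIdx?_get (pvTagLine t) (cs.splitOn '\n') i hidx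
    have ht' : '\n' ∉ t := by
      intro hnt
      have hmem : l ∈ cs.splitOn '\n' := List.mem_of_getElem? hl
      have hno := pv_chunk_no_nl cs.length cs le_rfl l hmem
      rw [pvTagLine, decide_eq_true_iff] at hpl
      exact hno (hpl.2.mem hnt)
    obtain ⟨j, hj⟩ : ∃ j, firstGood cs t 0 = some j := by
      cases hf : firstGood cs t 0 with
      | some j => exact ⟨j, rfl⟩
      | none =>
        rw [(pv_bridge t ht' cs.length cs le_rfl).1] at hf
        rw [hf] at hidx
        simp at hidx
    rw [find_tag_data_py, find_tag_data_py_alt,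
        loopA_eq rec.toList tag.toList (rec.toList.length + 2) 0 (by omega) (by omega),
        pv_chars_splitOn_eq,
        pv_scan_eq tag.toList (rec.toList.splitOn '\n') (rec.toList.splitOn '\n') 0 (by simp)]
    rw [← hcs, ← htdef]
    cases hnx : (cs.splitOn '\n')[i+1]? with
    | none =>
      have hdrop : (cs.splitOn '\n').drop (i+1) = [] := by
        rw [List.drop_eq_nil_iff]
        exact (List.getElem?_eq_none_iff.1 hnx)
      have hBnone : pvScan t (cs.splitOn '\n') = none := by
        rw [pv_scan_at t _ i hidx, hdrop]
      obtain ⟨v, hv⟩ := pv_finishA_some cs j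
      simp only [specA, hj, hv, hBnone]
      simp
    | some last =>
      rw [hnx] at hD
      simp only [Option.all_some] at hD
      rw [Bool.and_eq_true] at hD
      have hlen : i + 2 = (cs.splitOn '\n').length := by
        have := hD.1
        simpa using this
      have hbad : (decide (['>'] <+: last) || last.take 4 == ['$','$','$','$']) = false := by
        have h2 := hD.2
        rwa [Bool.not_eq_eq_eq_not, Bool.not_true] at h2
      have hgl : (cs.splitOn '\n').getLast? = some last := by
        rw [List.getLast?_eq_getElem?, show (cs.splitOn '\n').length - 1 = i + 1 by omega, hnx]
      have hlne : last ≠ [] := by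
        intro h0
        have hpred : (fun l : List Char => l.head? == some '>' && decide (t <:+: l)) = pvTagLine t :=
          funext (pv_pred_eq t)
        rw [hpred, hidx] at hPre2
        simp only [Option.elim_some] at hPre2
        rw [Bool.and_eq_false_iff] at hPre2
        rcases hPre2 with h | h
        · rw [hlen] at h
          simp at h
        · rw [hgl, h0] at h
          simp at h
      have hA := pv_diffA t ht' cs.length cs le_rfl i hidx hlen last hgl hbad
      have hcond : (PySem.Chars.startswith last ['>']
          || PySem.List.slice last none (some 4) == ['$','$','$','$']) = false := by
        rw [pv_sw_gt, PySem.List.slice_to last (by norm_num)]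
        simpa using hbad
      have hB : pvScan t (cs.splitOn '\n') = some last := by
        cases hd : (cs.splitOn '\n').drop (i+1) with
        | nil =>
          exfalso
          have h5 : ((cs.splitOn '\n').drop (i+1)).head? = (cs.splitOn '\n')[i+1]? :=
            List.head?_drop
          rw [hd, hnx] at h5
          simp at h5
        | cons x xs =>
          have h5 : ((cs.splitOn '\n').drop (i+1)).head? = (cs.splitOn '\n')[i+1]? :=
            List.head?_drop
          rw [hd, hnx] at h5
          have hx : x = last := Option.some.inj h5
          subst hx
          rw [pv_scan_at t _ i hidx, hd]
          dsimp only
          rw [if_neg (by simp [hcond])]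
      rw [hA, hB]
      simp only [Option.map_some, ne_eq, Option.some.injEq]
      intro heq
      have h2 := congrArg String.toList heq
      rw [String.toList_ofList, String.toList_ofList] at h2
      have h3 := congrArg List.length h2
      rw [List.length_dropLast] at h3
      have h4 : last.length ≠ 0 := by simpa using hlne
      omega
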